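-- pv_equiv track=rewrite | github.com/JoHi36/AnkiPlus | ai/kg_enrichment.py | _shares_stem
-- ===== SOURCE A (Python) =====
-- STEM_OVERLAP_MIN = 4         # Min shared prefix to consider a morphological variant
--
-- def _shares_stem(a, b):
--     """Check if two lowercased terms share a common stem of ≥ STEM_OVERLAP_MIN chars.
--
--     Catches: dünndarm/dünndarms, darm/darmdrehung/darmtätigkeit, fett/fettgewebe.
--     Skips: very short shared prefixes (≤3 chars) which are coincidental.
--     """
--     # Check prefix overlap
--     min_len = min(len(a), len(b))
--     shared = 0
--     for i in range(min_len):
--         if a[i] == b[i]: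
--             shared += 1
--         else:
--             break
--     if shared >= STEM_OVERLAP_MIN:
--         return True
--
--     # Check if one contains the other
--     if a in b or b in a:
--         return True
--
--     # Check suffix overlap (e.g., "darm" shared between "dünndarm" and "dickdarm")
--     for stem_len in range(STEM_OVERLAP_MIN, min_len + 1):
--         if a[-stem_len:] == b[-stem_len:]:
--             return True
--         # Also check if a term's suffix appears in the other term
--         if len(a) >= stem_len and a[-stem_len:] in b:
--             return True
--         if len(b) >= stem_len and b[-stem_len:] in a:
--             return True
--
--     return False
-- ===== SOURCE B (Python) =====
-- STEM_OVERLAP_MIN = 4         # Min shared prefix to consider a morphological variant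
--
-- def _shares_stem(a, b):
--     # Containment covers every short-string case and more.
--     if a in b or b in a:
--         return True
--     if len(a) < STEM_OVERLAP_MIN or len(b) < STEM_OVERLAP_MIN:
--         return False
--     # Any >=4-char shared prefix / shared-or-contained suffix reduces to the
--     # 4-char prefix test and the two 4-char suffix substring tests.
--     return a[:4] == b[:4] or a[-4:] in b or b[-4:] in a
-- ===== Notes on version B (the rewrite author's own statement) =====
-- stated objective: faster
-- what changed: The O(min_len) suffix loop of substring tests is replaced by the observation that any >=4-char suffix match implies the 4-char one, so B does only a containment test, the 4-char prefix comparison and two 4-char suffix substring tests.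
import Mathlib
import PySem

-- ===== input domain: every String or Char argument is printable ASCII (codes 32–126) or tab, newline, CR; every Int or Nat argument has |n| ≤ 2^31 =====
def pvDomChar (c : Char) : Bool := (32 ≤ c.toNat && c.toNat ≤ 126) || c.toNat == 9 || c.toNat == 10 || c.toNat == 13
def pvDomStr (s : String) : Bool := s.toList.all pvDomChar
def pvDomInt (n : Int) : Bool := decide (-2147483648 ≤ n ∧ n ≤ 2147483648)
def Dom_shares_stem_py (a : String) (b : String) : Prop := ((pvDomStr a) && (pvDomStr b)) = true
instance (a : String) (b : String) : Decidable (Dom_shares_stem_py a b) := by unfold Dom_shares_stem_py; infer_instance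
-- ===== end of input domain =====

-- B removes A's suffix loop: any >=4-char suffix match implies the 4-char one, so one
-- containment test, one 4-char prefix comparison and two 4-char suffix substring tests suffice.


-- ===== PORT A =====
-- prefix loop: for i in range(min_len): if a[i] == b[i]: shared += 1 else: break
def prefLoopA (la lb : List Char) (minLen i shared : Nat) : Nat :=
  if i < minLen then
    if la.getD i ' ' = lb.getD i ' ' then prefLoopA la lb minLen (i + 1) (shared + 1)
    else shared
  else shared
termination_by minLen - i

-- suffix loop: for stem_len in range(4, min_len + 1): three checks, else next stem_len
def sufLoopA (la lb : List Char) (minLen l : Nat) : Bool :=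
  if l < minLen + 1 then
    if PySem.List.slice la (some (-(l : Int))) none = PySem.List.slice lb (some (-(l : Int))) none then true
    else if decide (l ≤ la.length) && PySem.Chars.isIn (PySem.List.slice la (some (-(l : Int))) none) lb then true
    else if decide (l ≤ lb.length) && PySem.Chars.isIn (PySem.List.slice lb (some (-(l : Int))) none) la then true
    else sufLoopA la lb minLen (l + 1)
  else false
termination_by minLen + 1 - l

def shares_stem_py (a : String) (b : String) : Bool :=
  let la := a.toList
  let lb := b.toList
  let minLen := min la.length lb.length
  let shared := prefLoopA la lb minLen 0 0
  if 4 ≤ shared then true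
  else if PySem.Str.isIn a b || PySem.Str.isIn b a then true
  else sufLoopA la lb minLen 4

-- ===== PORT B =====
def shares_stem_py_alt (a : String) (b : String) : Bool :=
  if PySem.Str.isIn a b || PySem.Str.isIn b a then true
  else if a.toList.length < 4 || b.toList.length < 4 then false
  else decide (PySem.List.slice a.toList none (some 4) = PySem.List.slice b.toList none (some 4))
       || PySem.Chars.isIn (PySem.List.slice a.toList (some (-4)) none) b.toList
       || PySem.Chars.isIn (PySem.List.slice b.toList (some (-4)) none) a.toList

-- ===== PRECONDITION & SPEC =====
def Spec_shares_stem_py (a : String) (b : String) (out : Bool) : Prop := out = shares_stem_py_alt a b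
instance (a : String) (b : String) (out : Bool) : Decidable (Spec_shares_stem_py a b out) := by unfold Spec_shares_stem_py; infer_instance

-- ===== CLAIM (what is proved, stated in full; the proofs are below) =====
def Claim_equal_shares_stem_py : Prop := ∀ (a : String) (b : String), Dom_shares_stem_py a b → Spec_shares_stem_py a b (shares_stem_py a b)

-- ===== LEMMAS AND PROOFS =====

theorem prefLoopA_lower (la lb : List Char) (k i s : Nat) : s ≤ prefLoopA la lb k i s := by
  fun_induction prefLoopA la lb k i s <;> omega

theorem prefLoopA_upper (la lb : List Char) (k i s : Nat) : prefLoopA la lb k i s ≤ s + (k - i) := by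
  fun_induction prefLoopA la lb k i s <;> omega

theorem prefLoopA_mismatch (la lb : List Char) (k : Nat) (j : Nat)
    (hj : la.getD j ' ' ≠ lb.getD j ' ') :
    ∀ i s, i ≤ j → prefLoopA la lb k i s ≤ s + (j - i) := by
  intro i s
  fun_induction prefLoopA la lb k i s with
  | case1 i s hik heq ih =>
    intro hij
    have : i ≠ j := by rintro rfl; exact hj heq
    have := ih (by omega); omega
  | case2 => intro _; omega
  | case3 => intro _; omega

theorem prefLoopA_match (la lb : List Char) (k : Nat) (hk : 4 ≤ k)
    (h : ∀ j < 4, la.getD j ' ' = lb.getD j ' ') :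
    ∀ i s, i ≤ 4 → s + (4 - i) ≤ prefLoopA la lb k i s := by
  intro i s
  fun_induction prefLoopA la lb k i s with
  | case1 i s hik heq ih =>
    intro hi
    by_cases h4 : i < 4
    · have := ih (by omega); omega
    · have := prefLoopA_lower la lb k (i+1) (s+1); omega
  | case2 i s hik hne =>
    intro hi
    by_cases h4 : i < 4
    · exact absurd (h i h4) hne
    · omega
  | case3 i s hik => intro hi; omega

theorem prefLoopA_ge4_iff (la lb : List Char) (k : Nat) :
    4 ≤ prefLoopA la lb k 0 0 ↔ 4 ≤ k ∧ ∀ j < 4, la.getD j ' ' = lb.getD j ' ' := by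
  constructor
  · intro h
    have hup := prefLoopA_upper la lb k 0 0
    refine ⟨by omega, fun j hj => ?_⟩
    by_contra hne
    have := prefLoopA_mismatch la lb k j hne 0 0 (by omega)
    omega
  · rintro ⟨hk, h⟩
    have := prefLoopA_match la lb k hk h 0 0 (by omega)
    omega

theorem slice_neg4 (xs : List Char) :
    PySem.List.slice xs (some (-4)) none = xs.drop (xs.length - 4) := by
  have h := PySem.List.slice_from_neg_natCast xs 4 (by omega)
  simpa using h

theorem slice_take4 (xs : List Char) :
    PySem.List.slice xs none (some 4) = xs.take 4 := by
  have h := PySem.List.slice_to_natCast xs 4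
  simpa using h

theorem take4_iff (la lb : List Char) (ha : 4 ≤ la.length) (hb : 4 ≤ lb.length) :
    la.take 4 = lb.take 4 ↔ ∀ j < 4, la.getD j ' ' = lb.getD j ' ' := by
  constructor
  · intro h j hj
    have := congrArg (fun t => t.getD j ' ') h
    simpa [List.getD_eq_getElem?_getD, List.getElem?_take, hj] using this
  · intro h
    apply List.ext_getElem
    · simp; omega
    · intro j h1 h2
      have hj : j < 4 := by simp at h1; omega
      have := h j hj
      simpa [List.getD_eq_getElem?_getD, List.getElem?_take, hj,
             List.getElem?_eq_getElem, show j < la.length by omega, show j < lb.length by omega] using this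

theorem drop4_suffix (xs : List Char) (l : Nat) (h4 : 4 ≤ l) (hl : l ≤ xs.length) :
    xs.drop (xs.length - 4) <:+ xs.drop (xs.length - l) := by
  have : xs.drop (xs.length - 4) = (xs.drop (xs.length - l)).drop (l - 4) := by
    rw [List.drop_drop]; congr 1; omega
  rw [this]; exact List.drop_suffix _ _

theorem sufLoopA_forward (la lb : List Char) (k : Nat) (hka : k ≤ la.length) (hkb : k ≤ lb.length) :
    ∀ l, 4 ≤ l → sufLoopA la lb k l = true →
      (PySem.Chars.isIn (la.drop (la.length - 4)) lb = true ∨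
       PySem.Chars.isIn (lb.drop (lb.length - 4)) la = true) := by
  intro l h4
  fun_induction sufLoopA la lb k l with
  | case1 l hlt heq =>
    intro _
    left
    rw [PySem.List.slice_from_neg_natCast la l (by omega),
        PySem.List.slice_from_neg_natCast lb l (by omega)] at heq
    have h1 : la.drop (la.length - 4) = lb.drop (lb.length - 4) := by
      have e1 : la.drop (la.length - 4) = (la.drop (la.length - l)).drop (l - 4) := by
        rw [List.drop_drop]; congr 1; omega
      have e2 : lb.drop (lb.length - 4) = (lb.drop (lb.length - l)).drop (l - 4) := by
        rw [List.drop_drop]; congr 1; omega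
      rw [e1, e2, heq]
    rw [PySem.Chars.isIn_iff_infix, h1]
    exact (List.drop_suffix _ _).isInfix
  | case2 l hlt hne hin =>
    intro _
    left
    simp only [Bool.and_eq_true, decide_eq_true_eq] at hin
    obtain ⟨hla, hin⟩ := hin
    rw [PySem.List.slice_from_neg_natCast la l (by omega)] at hin
    rw [PySem.Chars.isIn_iff_infix] at hin ⊢
    exact ((drop4_suffix la l h4 hla).isInfix).trans hin
  | case3 l hlt hne1 hne2 hin =>
    intro _
    right
    simp only [Bool.and_eq_true, decide_eq_true_eq] at hin
    obtain ⟨hlb, hin⟩ := hin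
    rw [PySem.List.slice_from_neg_natCast lb l (by omega)] at hin
    rw [PySem.Chars.isIn_iff_infix] at hin ⊢
    exact ((drop4_suffix lb l h4 hlb).isInfix).trans hin
  | case4 l hlt h1 h2 h3 ih => exact fun h => ih (by omega) h
  | case5 l hlt => intro h; simp at h

theorem sufLoopA_backward (la lb : List Char) (k : Nat) (hk : 4 ≤ k)
    (hka : k ≤ la.length) (hkb : k ≤ lb.length)
    (h : PySem.Chars.isIn (la.drop (la.length - 4)) lb = true ∨
         PySem.Chars.isIn (lb.drop (lb.length - 4)) la = true) :
    sufLoopA la lb k 4 = true := by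
  rw [sufLoopA]
  rw [if_pos (by omega : 4 < k + 1)]
  rw [show ((-(4:Nat) : Int)) = (-((4:Nat):Int)) by norm_num] at *
  rw [PySem.List.slice_from_neg_natCast la 4 (by omega),
      PySem.List.slice_from_neg_natCast lb 4 (by omega)]
  split_ifs with h1 h2 h3
  · rfl
  · rfl
  · rfl
  · exfalso
    simp only [decide_eq_true_eq, Bool.and_eq_true, not_and] at h2 h3
    rcases h with h | h
    · exact h2 (by omega) h
    · exact h3 (by omega) h

theorem sufLoopA_eq (la lb : List Char) (k : Nat) (hk : 4 ≤ k)
    (hka : k ≤ la.length) (hkb : k ≤ lb.length) :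
    sufLoopA la lb k 4 =
      (PySem.Chars.isIn (la.drop (la.length - 4)) lb ||
       PySem.Chars.isIn (lb.drop (lb.length - 4)) la) := by
  cases h : (PySem.Chars.isIn (la.drop (la.length - 4)) lb ||
             PySem.Chars.isIn (lb.drop (lb.length - 4)) la) with
  | true =>
    rw [Bool.or_eq_true] at h
    exact sufLoopA_backward la lb k hk hka hkb h
  | false =>
    by_contra hs
    rw [Bool.not_eq_false] at hs
    have := sufLoopA_forward la lb k hka hkb 4 (by omega) hs
    rw [Bool.or_eq_false_iff] at h
    rcases this with h1 | h1
    · rw [h.1] at h1; exact absurd h1 (by simp)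
    · rw [h.2] at h1; exact absurd h1 (by simp)

-- ===== VERDICT (by name: the statement is the Claim_ definition above) =====
theorem shares_stem_py_spec : Claim_equal_shares_stem_py := by
  intro a b _
  unfold Spec_shares_stem_py shares_stem_py shares_stem_py_alt
  dsimp only
  set la := a.toList with hla
  set lb := b.toList with hlb
  set k := min la.length lb.length with hk
  by_cases hC : (PySem.Str.isIn a b || PySem.Str.isIn b a) = true
  · by_cases hP : 4 ≤ prefLoopA la lb k 0 0
    · rw [if_pos hP, if_pos hC]
    · rw [if_neg hP, if_pos hC, if_pos hC]
  · rw [if_neg hC]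
    by_cases hk4 : 4 ≤ k
    · rw [if_neg (by simp; omega : ¬ (la.length < 4 || lb.length < 4) = true)]
      rw [slice_take4, slice_take4, slice_neg4, slice_neg4]
      have hpref := prefLoopA_ge4_iff la lb k
      have htake := take4_iff la lb (by omega) (by omega)
      by_cases hP : 4 ≤ prefLoopA la lb k 0 0
      · rw [if_pos hP]
        have : la.take 4 = lb.take 4 := htake.mpr (hpref.mp hP).2
        simp [this]
      · rw [if_neg hP, if_neg hC]
        have hne : ¬ la.take 4 = lb.take 4 := by
          intro h
          exact hP (hpref.mpr ⟨hk4, htake.mp h⟩)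
        rw [sufLoopA_eq la lb k hk4 (by omega) (by omega)]
        simp [hne]
    · rw [if_pos (by simp; omega : (la.length < 4 || lb.length < 4) = true)]
      have hP : ¬ 4 ≤ prefLoopA la lb k 0 0 := by
        have := prefLoopA_upper la lb k 0 0; omega
      rw [if_neg hP, if_neg hC]
      rw [sufLoopA]
      rw [if_neg (by omega : ¬ 4 < k + 1)]
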